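-- pv_equiv track=rewrite | github.com/NastiaCu/AA_LABS | lab_4/balanced.py | balanced_tree
-- ===== SOURCE A (Python) =====
-- def balanced_tree(num_nodes):
--     tree = {}
--     queue = ['1']
--     count = 1
--     while queue and count < num_nodes:
--         parent = queue.pop(0)
--         children = set()
--         for i in range(3):
--             count += 1
--             child = str(count)
--             children.add(child)
--             tree[child] = set()
--             queue.append(child)
--             if count == num_nodes:
--                 break
--         tree[parent] = children
--     return tree
-- ===== SOURCE B (Python) =====
-- def balanced_tree(num_nodes):
--     if num_nodes < 2:
--         return {}
--     tree = {}
--     for parent in range(1, num_nodes + 1):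
--         first, last = 3 * parent - 1, min(3 * parent + 1, num_nodes)
--         for child in range(first, last + 1):
--             tree[str(child)] = set()
--         tree[str(parent)] = {str(child) for child in range(first, last + 1)}
--     return tree
-- ===== Notes on version B (the rewrite author's own statement) =====
-- stated objective: faster
-- what changed: Replaces the BFS queue/counter loop (with O(n) list.pop(0)) by a direct scan of parents 1..n using the closed-form child relation: children of node i are 3i-1..3i+1 capped at num_nodes; each child is registered as a leaf when discovered, then the parent's child set is assigned.
import Mathlib
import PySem

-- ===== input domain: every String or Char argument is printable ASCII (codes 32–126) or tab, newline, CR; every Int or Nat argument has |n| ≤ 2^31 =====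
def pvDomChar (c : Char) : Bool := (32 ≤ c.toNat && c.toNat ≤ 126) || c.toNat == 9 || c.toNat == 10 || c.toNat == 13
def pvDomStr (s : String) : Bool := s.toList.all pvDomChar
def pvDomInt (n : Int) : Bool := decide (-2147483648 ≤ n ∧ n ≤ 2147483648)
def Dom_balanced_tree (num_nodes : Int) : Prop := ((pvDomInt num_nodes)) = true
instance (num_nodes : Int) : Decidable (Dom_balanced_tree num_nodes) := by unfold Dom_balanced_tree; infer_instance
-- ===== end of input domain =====

-- B replaces A's BFS queue/counter loop by a direct scan of parents 1..n using the
-- closed-form child relation (children of node i are 3i-1..3i+1 capped at num_nodes).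

-- ===== PORT A =====
-- inner 'for i in range(3): …' loop of A, with its early 'break' when count == num_nodes;
-- state = (count, children, tree, queue)
def btInner (n : Int) : Nat → Int → PySem.Set String → PySem.Dict String (PySem.Set String) → List String →
    Int × PySem.Set String × PySem.Dict String (PySem.Set String) × List String
  | 0, count, children, tree, queue => (count, children, tree, queue)
  | f + 1, count, children, tree, queue =>
    let count := count + 1
    let child := PySem.Int.toStr count
    let children := PySem.Set.add children child
    let tree := tree.insert child PySem.Set.empty
    let queue := queue ++ [child]
    if count = n then (count, children, tree, queue)
    else btInner n f count children tree queue

-- termination helper for the while loop: the inner loop never decreases count, and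
-- strictly increases it when it runs at least one iteration
theorem btInner_count_lt (n : Int) (f : Nat) (c : Int) (s : PySem.Set String)
    (t : PySem.Dict String (PySem.Set String)) (q : List String) :
    c ≤ (btInner n f c s t q).1 ∧ (f ≠ 0 → c < (btInner n f c s t q).1) := by
  induction f generalizing c s t q with
  | zero => exact ⟨le_refl c, fun h => absurd rfl h⟩
  | succ f ih =>
    refine ⟨?_, fun _ => ?_⟩ <;>
    · simp only [btInner]
      split
      · omega
      · have := (ih (c + 1) (PySem.Set.add s (PySem.Int.toStr (c + 1)))
          (t.insert (PySem.Int.toStr (c + 1)) PySem.Set.empty)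
          (q ++ [PySem.Int.toStr (c + 1)])).1
        omega

-- A's 'while queue and count < num_nodes:' loop (parent = queue.pop(0))
def btLoop (n : Int) (tree : PySem.Dict String (PySem.Set String)) (queue : List String) (count : Int) :
    PySem.Dict String (PySem.Set String) :=
  match queue with
  | [] => tree
  | parent :: rest =>
    if _h : count < n then
      let r := btInner n 3 count PySem.Set.empty tree rest
      btLoop n (r.2.2.1.insert parent r.2.1) r.2.2.2 r.1
    else tree
termination_by (n - count).toNat
decreasing_by
  have := (btInner_count_lt n 3 count PySem.Set.empty tree rest).2 (by omega)
  omega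

def balanced_tree (num_nodes : Int) : List (String × List String) :=
  (btLoop num_nodes PySem.Dict.empty ["1"] 1).items

-- ===== PORT B =====
-- loop body of B: register each child of `parent` as a leaf, then assign the parent's child set
def btAssign (num_nodes : Int) (tree : PySem.Dict String (PySem.Set String)) (parent : Int) :
    PySem.Dict String (PySem.Set String) :=
  let first := 3 * parent - 1
  let last := min (3 * parent + 1) num_nodes
  let tree := (PySem.List.pyRange first (last + 1)).foldl
    (fun d child => d.insert (PySem.Int.toStr child) ([] : PySem.Set String)) tree
  tree.insert (PySem.Int.toStr parent)
    (PySem.Set.ofList ((PySem.List.pyRange first (last + 1)).map PySem.Int.toStr))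

def balanced_tree_alt (num_nodes : Int) : List (String × List String) :=
  if num_nodes < 2 then []
  else ((PySem.List.pyRange 1 (num_nodes + 1)).foldl (btAssign num_nodes) PySem.Dict.empty).items

-- ===== PRECONDITION & SPEC =====
def Spec_balanced_tree (num_nodes : Int) (out : List (String × List String)) : Prop := out = balanced_tree_alt num_nodes
instance (num_nodes : Int) (out : List (String × List String)) : Decidable (Spec_balanced_tree num_nodes out) := by unfold Spec_balanced_tree; infer_instance

-- ===== CLAIM (what is proved, stated in full; the proofs are below) =====
def Claim_equal_balanced_tree : Prop := ∀ (num_nodes : Int), Dom_balanced_tree num_nodes → Spec_balanced_tree num_nodes (balanced_tree num_nodes)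

-- ===== LEMMAS AND PROOFS =====

-- children of node i, as strings
def chL (n i : Int) : List String :=
  (PySem.List.pyRange (3 * i - 1) (min (3 * i + 1) n + 1)).map PySem.Int.toStr

-- the key-insertion order both programs produce: 2,3,4 (capped), then 1, then 5..m
def keyOrder (m : Int) : List Int :=
  PySem.List.pyRange 2 (min 4 m + 1) ++ [1] ++ PySem.List.pyRange 5 (m + 1)

-- the dict after k ≥ 1 parents have been processed (A: count = min(3k+1, n))
def treeK (n k : Int) : PySem.Dict String (PySem.Set String) :=
  PySem.Dict.mk ((keyOrder (min (3 * k + 1) n)).map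
    (fun j => (PySem.Int.toStr j, if j ≤ k then chL n j else [])))

-- A's queue after k parents have been processed
def queueK (n k : Int) : List String :=
  (PySem.List.pyRange (k + 1) (min (3 * k + 1) n + 1)).map PySem.Int.toStr

-- the final dict contents both programs produce
def finalItems (n : Int) : List (String × List String) :=
  (keyOrder n).map (fun j => (PySem.Int.toStr j, chL n j))

theorem digitChar_inj (x y : Nat) (hx : x < 10) (hy : y < 10)
    (h : Nat.digitChar x = Nat.digitChar y) : x = y := by
  interval_cases x <;> interval_cases y <;> simp_all [Nat.digitChar]

theorem nrepr_inj (a : Nat) : ∀ b : Nat, Nat.repr a = Nat.repr b → a = b := by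
  induction a using Nat.strong_induction_on with
  | _ a ih =>
    intro b h
    rcases Nat.lt_or_ge a 10 with ha | ha <;> rcases Nat.lt_or_ge b 10 with hb | hb
    · rw [Nat.repr_of_lt ha, Nat.repr_of_lt hb] at h
      have h2 := congrArg String.toList h
      simp only [String.toList_singleton] at h2
      exact digitChar_inj a b ha hb (List.cons.injEq .. ▸ h2).1
    · exfalso
      have h2 := congrArg String.length h
      rw [Nat.repr_of_lt ha, Nat.repr_of_ge hb, String.length_append,
        String.length_singleton, String.length_singleton] at h2
      have := @Nat.length_repr_pos (b / 10)
      omega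
    · exfalso
      have h2 := congrArg String.length h
      rw [Nat.repr_of_lt hb, Nat.repr_of_ge ha, String.length_append,
        String.length_singleton, String.length_singleton] at h2
      have := @Nat.length_repr_pos (a / 10)
      omega
    · rw [Nat.repr_of_ge ha, Nat.repr_of_ge hb] at h
      have h2 := congrArg String.toList h
      simp only [String.toList_append, String.toList_singleton] at h2
      obtain ⟨hpre, hlast⟩ := List.append_singleton_inj.mp h2
      have hdiv : a / 10 = b / 10 :=
        ih (a / 10) (Nat.div_lt_self (by omega) (by omega)) (b / 10) (String.toList_inj.mp hpre)
      have hmod : a % 10 = b % 10 :=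
        digitChar_inj _ _ (Nat.mod_lt _ (by omega)) (Nat.mod_lt _ (by omega)) hlast
      omega

theorem toStr_inj (a b : Int) (ha : 0 ≤ a) (hb : 0 ≤ b)
    (h : PySem.Int.toStr a = PySem.Int.toStr b) : a = b := by
  unfold PySem.Int.toStr PySem.Int.toChars at h
  rw [if_neg (by omega), if_neg (by omega)] at h
  rw [← Nat.repr_eq_ofList_toDigits, ← Nat.repr_eq_ofList_toDigits] at h
  have := nrepr_inj a.toNat b.toNat h
  omega

theorem toStr_ne (a b : Int) (ha : 0 ≤ a) (hb : 0 ≤ b) (hne : a ≠ b) :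
    PySem.Int.toStr a ≠ PySem.Int.toStr b :=
  fun h => hne (toStr_inj a b ha hb h)

theorem mem_keyOrder_iff (m j : Int) (hm : 2 ≤ m) : j ∈ keyOrder m ↔ 1 ≤ j ∧ j ≤ m := by
  unfold keyOrder
  simp only [List.mem_append, List.mem_singleton, PySem.List.mem_pyRange_one]
  omega

theorem keyOrder_append (m m' : Int) (h4 : 4 ≤ m) (hmm' : m ≤ m') :
    keyOrder m ++ PySem.List.pyRange (m + 1) (m' + 1) = keyOrder m' := by
  unfold keyOrder
  rw [min_eq_left (by omega), min_eq_left (by omega), List.append_assoc, List.append_assoc,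
    ← PySem.List.pyRange_one_append 5 (m + 1) (m' + 1) (by omega) (by omega)]
  simp [List.append_assoc]

theorem nodup_map_toStr (l : List Int) (h : ∀ x ∈ l, 0 ≤ x) (hl : l.Nodup) :
    (l.map PySem.Int.toStr).Nodup :=
  (List.nodup_map_iff_inj_on hl).mpr (fun x hx y hy e => toStr_inj x y (h x hx) (h y hy) e)

theorem treeK_not_contains (n k a : Int) (hn : 2 ≤ n) (hk : 1 ≤ k) (ha : min (3 * k + 1) n < a) :
    (treeK n k).contains (PySem.Int.toStr a) = false := by
  rw [PySem.Dict.contains_eq_decide_mem_keys]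
  unfold treeK
  rw [PySem.Dict.keys_mk, List.map_map]
  simp only [decide_eq_false_iff_not]
  intro hmem
  obtain ⟨j, hj, hje⟩ := List.mem_map.mp hmem
  have hb := (mem_keyOrder_iff _ j (by omega)).mp hj
  have := toStr_inj j a (by omega) (by omega) hje
  omega

theorem treeK_contains (n k a : Int) (hn : 2 ≤ n) (hk : 1 ≤ k) (ha1 : 1 ≤ a)
    (ha2 : a ≤ min (3 * k + 1) n) : (treeK n k).contains (PySem.Int.toStr a) = true := by
  rw [PySem.Dict.contains_eq_decide_mem_keys]
  unfold treeK
  rw [PySem.Dict.keys_mk, List.map_map]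
  simp only [decide_eq_true_eq]
  exact List.mem_map.mpr ⟨a, (mem_keyOrder_iff _ a (by omega)).mpr ⟨ha1, ha2⟩, rfl⟩

theorem btInner3 (n c : Int) (hc : c < n) (hc0 : 0 ≤ c)
    (t : PySem.Dict String (PySem.Set String)) (q : List String) :
    btInner n 3 c PySem.Set.empty t q =
      (min (c + 3) n,
       (PySem.List.pyRange (c + 1) (min (c + 3) n + 1)).map PySem.Int.toStr,
       (PySem.List.pyRange (c + 1) (min (c + 3) n + 1)).foldl
         (fun d j => d.insert (PySem.Int.toStr j) ([] : PySem.Set String)) t,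
       q ++ (PySem.List.pyRange (c + 1) (min (c + 3) n + 1)).map PySem.Int.toStr) := by
  have ne12 := toStr_ne (c + 1) (c + 2) (by omega) (by omega) (by omega)
  have ne13 := toStr_ne (c + 1) (c + 3) (by omega) (by omega) (by omega)
  have ne23 := toStr_ne (c + 2) (c + 3) (by omega) (by omega) (by omega)
  rcases (by omega : n = c + 1 ∨ n = c + 2 ∨ c + 3 ≤ n) with hn | hn | hn
  · have hr : PySem.List.pyRange (c + 1) (c + 1 + 1) = [c + 1] := PySem.List.pyRange_one_singleton _
    subst hn
    simp [btInner, hr, PySem.Set.add, PySem.Set.contains, PySem.Set.empty]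
  · have hr : PySem.List.pyRange (c + 1) (c + 2 + 1) = [c + 1, c + 2] := by
      rw [PySem.List.pyRange_one_cons (by omega), show c + 1 + 1 = c + 2 by ring,
        PySem.List.pyRange_one_cons (by omega), PySem.List.pyRange_one_eq_nil (by omega)]
    subst hn
    simp [btInner, hr, PySem.Set.add, PySem.Set.contains, PySem.Set.empty,
      List.contains_eq_mem, ne12.symm, show (c : Int) + 1 + 1 = c + 2 by ring,
      show ¬(c + 1 = c + 2) by omega]
  · have hr : PySem.List.pyRange (c + 1) (c + 3 + 1) = [c + 1, c + 2, c + 3] := by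
      rw [PySem.List.pyRange_one_cons (by omega), show c + 1 + 1 = c + 2 by ring,
        PySem.List.pyRange_one_cons (by omega), show c + 2 + 1 = c + 3 by ring,
        PySem.List.pyRange_one_cons (by omega), PySem.List.pyRange_one_eq_nil (by omega)]
    have hmin : min (c + 3) n = c + 3 := by omega
    simp [btInner, hmin, hr, PySem.Set.add, PySem.Set.contains, PySem.Set.empty,
      List.contains_eq_mem, ne12.symm, ne13.symm, ne23.symm,
      show (c : Int) + 1 + 1 = c + 2 by ring, show (c : Int) + 2 + 1 = c + 3 by ring,
      show ¬(c + 1 = n) by omega, show ¬(c + 2 = n) by omega]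

theorem loop_exit (n k : Int) (hn : 2 ≤ n) (hk : 1 ≤ k) (h : n ≤ 3 * k + 1) :
    btLoop n (treeK n k) (queueK n k) (min (3 * k + 1) n) = PySem.Dict.mk (finalItems n) := by
  have hmin : min (3 * k + 1) n = n := by omega
  have hstop : ∀ q, btLoop n (treeK n k) q n = treeK n k := by
    intro q
    cases q with
    | nil => rw [btLoop]
    | cons p rest => rw [btLoop]; simp
  rw [hmin, hstop]
  unfold treeK finalItems
  rw [hmin]
  congr 1
  refine List.map_congr_left (fun j hj => ?_)
  have hb := (mem_keyOrder_iff n j hn).mp hj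
  by_cases hjk : j ≤ k
  · rw [if_pos hjk]
  · rw [if_neg hjk]
    unfold chL
    rw [PySem.List.pyRange_one_eq_nil (by omega)]
    rfl

theorem loop_step (n k : Int) (hk : 1 ≤ k) (h : 3 * k + 1 < n) :
    btLoop n (treeK n k) (queueK n k) (min (3 * k + 1) n) =
      btLoop n (treeK n (k + 1)) (queueK n (k + 1)) (min (3 * (k + 1) + 1) n) := by
  have hn : (2 : Int) ≤ n := by omega
  have hmin : min (3 * k + 1) n = 3 * k + 1 := by omega
  have e34 : 3 * k + 1 + 3 = 3 * (k + 1) + 1 := by ring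
  have e2 : 3 * k + 1 + 1 = 3 * (k + 1) - 1 := by ring
  have hq : queueK n k =
      PySem.Int.toStr (k + 1) :: (PySem.List.pyRange (k + 2) (3 * k + 1 + 1)).map PySem.Int.toStr := by
    unfold queueK
    rw [hmin, PySem.List.pyRange_one_cons (by omega), show k + 1 + 1 = k + 2 by ring, List.map_cons]
  rw [hmin, hq, btLoop, dif_pos h, btInner3 n (3 * k + 1) h (by omega)]
  have hfresh : ∀ a ∈ PySem.List.pyRange (3 * k + 1 + 1) (min (3 * k + 1 + 3) n + 1),
      (treeK n k).contains (PySem.Int.toStr a) = false := by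
    intro a ha
    rw [PySem.List.mem_pyRange_one] at ha
    exact treeK_not_contains n k a hn hk (by omega)
  have hnodup : ((PySem.List.pyRange (3 * k + 1 + 1) (min (3 * k + 1 + 3) n + 1)).map
      PySem.Int.toStr).Nodup := by
    refine nodup_map_toStr _ (fun x hx => ?_) (PySem.List.nodup_pyRange_one _ _)
    rw [PySem.List.mem_pyRange_one] at hx; omega
  have hitems : ((PySem.List.pyRange (3 * k + 1 + 1) (min (3 * k + 1 + 3) n + 1)).foldl
      (fun d j => d.insert (PySem.Int.toStr j) ([] : PySem.Set String)) (treeK n k)).items =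
      (treeK n k).items ++ (PySem.List.pyRange (3 * k + 1 + 1) (min (3 * k + 1 + 3) n + 1)).map
        (fun a => (PySem.Int.toStr a, ([] : PySem.Set String))) :=
    PySem.Dict.items_foldl_insert_fresh _ _ _ _ hfresh hnodup
  set T' := (PySem.List.pyRange (3 * k + 1 + 1) (min (3 * k + 1 + 3) n + 1)).foldl
      (fun d j => d.insert (PySem.Int.toStr j) ([] : PySem.Set String)) (treeK n k) with hT'
  have hcontains : T'.contains (PySem.Int.toStr (k + 1)) = true := by
    rw [PySem.Dict.contains_eq_decide_mem_keys]
    have : PySem.Int.toStr (k + 1) ∈ T'.keys := by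
      show PySem.Int.toStr (k + 1) ∈ T'.items.map (·.1)
      rw [hitems]
      refine List.mem_map.mpr ⟨(PySem.Int.toStr (k + 1), if k + 1 ≤ k then chL n (k + 1) else []),
        List.mem_append_left _ ?_, rfl⟩
      unfold treeK
      exact List.mem_map.mpr ⟨k + 1, (mem_keyOrder_iff _ (k + 1) (by omega)).mpr ⟨by omega, by omega⟩, rfl⟩
    simp [this]
  have hud : (T'.insert (PySem.Int.toStr (k + 1))
      ((PySem.List.pyRange (3 * k + 1 + 1) (min (3 * k + 1 + 3) n + 1)).map PySem.Int.toStr)) =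
      treeK n (k + 1) := by
    apply PySem.Dict.ext
    rw [PySem.Dict.items_insert_of_contains _ _ hcontains, hitems]
    unfold treeK
    rw [List.map_append, List.map_map, List.map_map]
    have hold : (keyOrder (min (3 * k + 1) n)).map
        ((fun p => if (p.1 == PySem.Int.toStr (k + 1)) = true then
            (PySem.Int.toStr (k + 1),
             (PySem.List.pyRange (3 * k + 1 + 1) (min (3 * k + 1 + 3) n + 1)).map PySem.Int.toStr)
          else p) ∘
          fun j => (PySem.Int.toStr j, if j ≤ k then chL n j else [])) =
        (keyOrder (3 * k + 1)).map (fun j => (PySem.Int.toStr j, if j ≤ k + 1 then chL n j else [])) := by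
      rw [hmin]
      refine List.map_congr_left (fun j hj => ?_)
      have hb := (mem_keyOrder_iff _ j (by omega)).mp hj
      simp only [Function.comp, beq_iff_eq]
      by_cases hjk : j = k + 1
      · subst hjk
        rw [if_pos rfl, if_pos (by omega)]
        unfold chL
        rw [e2, e34]
      · rw [if_neg (toStr_ne j (k + 1) (by omega) (by omega) hjk)]
        have : (j ≤ k) = (j ≤ k + 1) := by
          by_cases hle : j ≤ k
          · simp [hle]; omega
          · simp [hle]; omega
        simp only [this]
    have hnew : (PySem.List.pyRange (3 * k + 1 + 1) (min (3 * k + 1 + 3) n + 1)).map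
        ((fun p => if (p.1 == PySem.Int.toStr (k + 1)) = true then
            (PySem.Int.toStr (k + 1),
             (PySem.List.pyRange (3 * k + 1 + 1) (min (3 * k + 1 + 3) n + 1)).map PySem.Int.toStr)
          else p) ∘
          fun a => (PySem.Int.toStr a, ([] : PySem.Set String))) =
        (PySem.List.pyRange (3 * k + 1 + 1) (min (3 * k + 1 + 3) n + 1)).map
          (fun j => (PySem.Int.toStr j, if j ≤ k + 1 then chL n j else [])) := by
      refine List.map_congr_left (fun a ha => ?_)
      rw [PySem.List.mem_pyRange_one] at ha
      simp only [Function.comp, beq_iff_eq]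
      rw [if_neg (toStr_ne a (k + 1) (by omega) (by omega) (by omega)), if_neg (by omega)]
    rw [hold, hnew, ← List.map_append, e34, keyOrder_append (3 * k + 1) (min (3 * (k + 1) + 1) n)
      (by omega) (by omega)]
  have hqueue : (PySem.List.pyRange (k + 2) (3 * k + 1 + 1)).map PySem.Int.toStr ++
      (PySem.List.pyRange (3 * k + 1 + 1) (min (3 * k + 1 + 3) n + 1)).map PySem.Int.toStr =
      queueK n (k + 1) := by
    unfold queueK
    rw [← List.map_append, ← PySem.List.pyRange_one_append (k + 2) (3 * k + 1 + 1)
      (min (3 * k + 1 + 3) n + 1) (by omega) (by omega), show k + 1 + 1 = k + 2 by ring, e34]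
  simp only [← hT']
  rw [hud, hqueue, e34]

theorem loop_inv (n : Int) (hn : 2 ≤ n) : ∀ (M : Nat) (k : Int), (n - 3 * k).toNat ≤ M →
    1 ≤ k → btLoop n (treeK n k) (queueK n k) (min (3 * k + 1) n) = PySem.Dict.mk (finalItems n) := by
  intro M
  induction M with
  | zero => intro k hMk hk; exact loop_exit n k hn hk (by omega)
  | succ M ih =>
    intro k hMk hk
    by_cases hcase : 3 * k + 1 < n
    · rw [loop_step n k hk hcase]
      exact ih (k + 1) (by omega) (by omega)
    · exact loop_exit n k hn hk (by omega)

theorem entry (n : Int) (hn : 2 ≤ n) :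
    btLoop n PySem.Dict.empty ["1"] 1 = btLoop n (treeK n 1) (queueK n 1) (min (3 * 1 + 1) n) := by
  rw [btLoop, dif_pos (by omega : (1 : Int) < n), btInner3 n 1 (by omega) (by omega)]
  have hone : "1" = PySem.Int.toStr 1 := by decide
  have hfresh : ∀ a ∈ PySem.List.pyRange (1 + 1) (min (1 + 3) n + 1),
      (PySem.Dict.empty : PySem.Dict String (PySem.Set String)).contains (PySem.Int.toStr a) = false :=
    fun a _ => rfl
  have hnodup : ((PySem.List.pyRange (1 + 1) (min (1 + 3) n + 1)).map PySem.Int.toStr).Nodup := by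
    refine nodup_map_toStr _ (fun x hx => ?_) (PySem.List.nodup_pyRange_one _ _)
    rw [PySem.List.mem_pyRange_one] at hx; omega
  have hitems := PySem.Dict.items_foldl_insert_fresh
    (PySem.List.pyRange (1 + 1) (min (1 + 3) n + 1)) PySem.Int.toStr
    (fun _ => ([] : PySem.Set String)) PySem.Dict.empty hfresh hnodup
  set T' := (PySem.List.pyRange (1 + 1) (min (1 + 3) n + 1)).foldl
      (fun d j => d.insert (PySem.Int.toStr j) ([] : PySem.Set String)) PySem.Dict.empty with hT'
  have hnc : T'.contains (PySem.Int.toStr 1) = false := by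
    rw [PySem.Dict.contains_eq_decide_mem_keys]
    have : PySem.Int.toStr 1 ∉ T'.keys := by
      show PySem.Int.toStr 1 ∉ T'.items.map (·.1)
      rw [hitems]
      intro hmem
      simp only [List.map_append, List.map_map, List.mem_append] at hmem
      rcases hmem with hmem | hmem
      · simp [PySem.Dict.empty] at hmem
      · obtain ⟨a, ha, hae⟩ := List.mem_map.mp hmem
        rw [PySem.List.mem_pyRange_one] at ha
        exact toStr_ne a 1 (by omega) (by omega) (by omega) hae
    simp [this]
  have hud : T'.insert (PySem.Int.toStr 1)
      ((PySem.List.pyRange (1 + 1) (min (1 + 3) n + 1)).map PySem.Int.toStr) = treeK n 1 := by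
    apply PySem.Dict.ext
    rw [PySem.Dict.items_insert_of_not_contains _ _ hnc, hitems]
    unfold treeK keyOrder
    have hminmin : min 4 (min (3 * 1 + 1) n) = min 4 n := by omega
    have hninner : min (3 * 1 + 1) n + 1 ≤ 5 := by omega
    rw [hminmin, PySem.List.pyRange_one_eq_nil hninner, List.map_append, List.map_append]
    simp only [List.map_cons, List.map_nil, List.append_nil]
    rw [show (1 : Int) + 3 = 4 by norm_num, show (1 : Int) + 1 = 2 by norm_num]
    simp only [PySem.Dict.empty, List.nil_append]
    congr 1
    · refine List.map_congr_left (fun a ha => ?_)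
      rw [PySem.List.mem_pyRange_one] at ha
      rw [if_neg (by omega)]
  rw [← hone] at hud
  simp only [← hT']
  rw [hud]
  unfold queueK
  norm_num

-- ===== B-side lemmas =====

theorem chL_empty (n i : Int) (h : n ≤ 3 * i - 2) : chL n i = [] := by
  unfold chL
  rw [PySem.List.pyRange_one_eq_nil (by omega)]
  rfl

theorem chL_eq_ofList (n i : Int) (hi : 1 ≤ i) :
    PySem.Set.ofList ((PySem.List.pyRange (3 * i - 1) (min (3 * i + 1) n + 1)).map PySem.Int.toStr)
      = chL n i := by
  unfold chL
  refine PySem.Set.ofList_eq_self_of_nodup _ ?_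
  refine nodup_map_toStr _ (fun x hx => ?_) (PySem.List.nodup_pyRange_one _ _)
  rw [PySem.List.mem_pyRange_one] at hx; omega

theorem bAssign_one (n : Int) (hn : 2 ≤ n) :
    btAssign n PySem.Dict.empty 1 = treeK n 1 := by
  show ((PySem.List.pyRange (3 * 1 - 1) (min (3 * 1 + 1) n + 1)).foldl
      (fun d child => d.insert (PySem.Int.toStr child) ([] : PySem.Set String))
      PySem.Dict.empty).insert (PySem.Int.toStr 1)
    (PySem.Set.ofList ((PySem.List.pyRange (3 * 1 - 1) (min (3 * 1 + 1) n + 1)).map PySem.Int.toStr))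
      = treeK n 1
  have e1 : 3 * (1 : Int) - 1 = 1 + 1 := by norm_num
  have e2 : min (3 * (1 : Int) + 1) n = min (1 + 3) n := by norm_num
  rw [e1, e2]
  have hfresh : ∀ a ∈ PySem.List.pyRange (1 + 1) (min (1 + 3) n + 1),
      (PySem.Dict.empty : PySem.Dict String (PySem.Set String)).contains (PySem.Int.toStr a) = false :=
    fun a _ => rfl
  have hnodup : ((PySem.List.pyRange (1 + 1) (min (1 + 3) n + 1)).map PySem.Int.toStr).Nodup := by
    refine nodup_map_toStr _ (fun x hx => ?_) (PySem.List.nodup_pyRange_one _ _)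
    rw [PySem.List.mem_pyRange_one] at hx; omega
  have hitems := PySem.Dict.items_foldl_insert_fresh
    (PySem.List.pyRange (1 + 1) (min (1 + 3) n + 1)) PySem.Int.toStr
    (fun _ => ([] : PySem.Set String)) PySem.Dict.empty hfresh hnodup
  set T' := (PySem.List.pyRange (1 + 1) (min (1 + 3) n + 1)).foldl
      (fun d child => d.insert (PySem.Int.toStr child) ([] : PySem.Set String)) PySem.Dict.empty with hT'
  have hnc : T'.contains (PySem.Int.toStr 1) = false := by
    rw [PySem.Dict.contains_eq_decide_mem_keys]
    have : PySem.Int.toStr 1 ∉ T'.keys := by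
      show PySem.Int.toStr 1 ∉ T'.items.map (·.1)
      rw [hitems]
      intro hmem
      simp only [List.map_append, List.map_map, List.mem_append] at hmem
      rcases hmem with hmem | hmem
      · simp [PySem.Dict.empty] at hmem
      · obtain ⟨a, ha, hae⟩ := List.mem_map.mp hmem
        rw [PySem.List.mem_pyRange_one] at ha
        exact toStr_ne a 1 (by omega) (by omega) (by omega) hae
    simp [this]
  have hval : PySem.Set.ofList ((PySem.List.pyRange (1 + 1) (min (1 + 3) n + 1)).map PySem.Int.toStr)
      = chL n 1 := by
    rw [show (1 : Int) + 1 = 3 * 1 - 1 by norm_num, show (1 : Int) + 3 = 3 * 1 + 1 by norm_num]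
    exact chL_eq_ofList n 1 le_rfl
  rw [hval]
  apply PySem.Dict.ext
  rw [PySem.Dict.items_insert_of_not_contains _ _ hnc, hitems]
  unfold treeK keyOrder
  have hminmin : min 4 (min (3 * 1 + 1) n) = min 4 n := by omega
  have hninner : min (3 * 1 + 1) n + 1 ≤ 5 := by omega
  rw [hminmin, PySem.List.pyRange_one_eq_nil hninner, List.map_append, List.map_append]
  simp only [List.map_cons, List.map_nil, List.append_nil]
  rw [show (1 : Int) + 3 = 4 by norm_num, show (1 : Int) + 1 = 2 by norm_num]
  simp only [PySem.Dict.empty, List.nil_append]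
  congr 1
  · refine List.map_congr_left (fun a ha => ?_)
    rw [PySem.List.mem_pyRange_one] at ha
    rw [if_neg (by omega)]

theorem bAssign_succ (n k : Int) (hk : 1 ≤ k) (hkn : k < n) :
    btAssign n (treeK n k) (k + 1) = treeK n (k + 1) := by
  have hn : (2 : Int) ≤ n := by omega
  show ((PySem.List.pyRange (3 * (k + 1) - 1) (min (3 * (k + 1) + 1) n + 1)).foldl
      (fun d child => d.insert (PySem.Int.toStr child) ([] : PySem.Set String))
      (treeK n k)).insert (PySem.Int.toStr (k + 1))
    (PySem.Set.ofList ((PySem.List.pyRange (3 * (k + 1) - 1) (min (3 * (k + 1) + 1) n + 1)).map PySem.Int.toStr))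
      = treeK n (k + 1)
  have e1 : 3 * (k + 1) - 1 = 3 * k + 1 + 1 := by ring
  have e2 : 3 * (k + 1) + 1 = 3 * k + 1 + 3 := by ring
  rw [e1, e2]
  by_cases hcase : 3 * k + 1 < n
  · -- the registration range is fresh, then the parent key (already present) is updated
    have hmin : min (3 * k + 1) n = 3 * k + 1 := by omega
    have e34 : 3 * k + 1 + 3 = 3 * (k + 1) + 1 := by ring
    have e2' : 3 * k + 1 + 1 = 3 * (k + 1) - 1 := by ring
    have hfresh : ∀ a ∈ PySem.List.pyRange (3 * k + 1 + 1) (min (3 * k + 1 + 3) n + 1),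
        (treeK n k).contains (PySem.Int.toStr a) = false := by
      intro a ha
      rw [PySem.List.mem_pyRange_one] at ha
      exact treeK_not_contains n k a hn hk (by omega)
    have hnodup : ((PySem.List.pyRange (3 * k + 1 + 1) (min (3 * k + 1 + 3) n + 1)).map
        PySem.Int.toStr).Nodup := by
      refine nodup_map_toStr _ (fun x hx => ?_) (PySem.List.nodup_pyRange_one _ _)
      rw [PySem.List.mem_pyRange_one] at hx; omega
    have hitems : ((PySem.List.pyRange (3 * k + 1 + 1) (min (3 * k + 1 + 3) n + 1)).foldl
        (fun d child => d.insert (PySem.Int.toStr child) ([] : PySem.Set String)) (treeK n k)).items =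
        (treeK n k).items ++ (PySem.List.pyRange (3 * k + 1 + 1) (min (3 * k + 1 + 3) n + 1)).map
          (fun a => (PySem.Int.toStr a, ([] : PySem.Set String))) :=
      PySem.Dict.items_foldl_insert_fresh _ _ _ _ hfresh hnodup
    set T' := (PySem.List.pyRange (3 * k + 1 + 1) (min (3 * k + 1 + 3) n + 1)).foldl
        (fun d child => d.insert (PySem.Int.toStr child) ([] : PySem.Set String)) (treeK n k) with hT'
    have hcontains : T'.contains (PySem.Int.toStr (k + 1)) = true := by
      rw [PySem.Dict.contains_eq_decide_mem_keys]
      have : PySem.Int.toStr (k + 1) ∈ T'.keys := by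
        show PySem.Int.toStr (k + 1) ∈ T'.items.map (·.1)
        rw [hitems]
        refine List.mem_map.mpr ⟨(PySem.Int.toStr (k + 1), if k + 1 ≤ k then chL n (k + 1) else []),
          List.mem_append_left _ ?_, rfl⟩
        unfold treeK
        exact List.mem_map.mpr ⟨k + 1, (mem_keyOrder_iff _ (k + 1) (by omega)).mpr ⟨by omega, by omega⟩, rfl⟩
      simp [this]
    have hval : PySem.Set.ofList ((PySem.List.pyRange (3 * k + 1 + 1) (min (3 * k + 1 + 3) n + 1)).map
        PySem.Int.toStr) =
        (PySem.List.pyRange (3 * k + 1 + 1) (min (3 * k + 1 + 3) n + 1)).map PySem.Int.toStr :=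
      PySem.Set.ofList_eq_self_of_nodup _ hnodup
    rw [hval]
    apply PySem.Dict.ext
    rw [PySem.Dict.items_insert_of_contains _ _ hcontains, hitems]
    unfold treeK
    rw [List.map_append, List.map_map, List.map_map]
    have hold : (keyOrder (min (3 * k + 1) n)).map
        ((fun p => if (p.1 == PySem.Int.toStr (k + 1)) = true then
            (PySem.Int.toStr (k + 1),
             (PySem.List.pyRange (3 * k + 1 + 1) (min (3 * k + 1 + 3) n + 1)).map PySem.Int.toStr)
          else p) ∘
          fun j => (PySem.Int.toStr j, if j ≤ k then chL n j else [])) =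
        (keyOrder (3 * k + 1)).map (fun j => (PySem.Int.toStr j, if j ≤ k + 1 then chL n j else [])) := by
      rw [hmin]
      refine List.map_congr_left (fun j hj => ?_)
      have hb := (mem_keyOrder_iff _ j (by omega)).mp hj
      simp only [Function.comp, beq_iff_eq]
      by_cases hjk : j = k + 1
      · subst hjk
        rw [if_pos rfl, if_pos (by omega)]
        unfold chL
        rw [e2', e34]
      · rw [if_neg (toStr_ne j (k + 1) (by omega) (by omega) hjk)]
        have : (j ≤ k) = (j ≤ k + 1) := by
          by_cases hle : j ≤ k
          · simp [hle]; omega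
          · simp [hle]; omega
        simp only [this]
    have hnew : (PySem.List.pyRange (3 * k + 1 + 1) (min (3 * k + 1 + 3) n + 1)).map
        ((fun p => if (p.1 == PySem.Int.toStr (k + 1)) = true then
            (PySem.Int.toStr (k + 1),
             (PySem.List.pyRange (3 * k + 1 + 1) (min (3 * k + 1 + 3) n + 1)).map PySem.Int.toStr)
          else p) ∘
          fun a => (PySem.Int.toStr a, ([] : PySem.Set String))) =
        (PySem.List.pyRange (3 * k + 1 + 1) (min (3 * k + 1 + 3) n + 1)).map
          (fun j => (PySem.Int.toStr j, if j ≤ k + 1 then chL n j else [])) := by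
      refine List.map_congr_left (fun a ha => ?_)
      rw [PySem.List.mem_pyRange_one] at ha
      simp only [Function.comp, beq_iff_eq]
      rw [if_neg (toStr_ne a (k + 1) (by omega) (by omega) (by omega)), if_neg (by omega)]
    rw [hold, hnew, ← List.map_append, e34, keyOrder_append (3 * k + 1) (min (3 * (k + 1) + 1) n)
      (by omega) (by omega)]
  · -- node k+1 is a leaf: the registration range is empty, the assigned set is empty
    have hminn : min (3 * k + 1) n = n := by omega
    have hmin' : min (3 * k + 1 + 3) n = n := by omega
    have hempty : PySem.List.pyRange (3 * k + 1 + 1) (min (3 * k + 1 + 3) n + 1) = [] := by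
      rw [hmin']
      exact PySem.List.pyRange_one_eq_nil (by omega)
    rw [hempty]
    simp only [List.foldl_nil, List.map_nil]
    have hcontains : (treeK n k).contains (PySem.Int.toStr (k + 1)) = true :=
      treeK_contains n k (k + 1) hn hk (by omega) (by omega)
    apply PySem.Dict.ext
    rw [PySem.Dict.items_insert_of_contains _ _ hcontains]
    unfold treeK
    rw [List.map_map]
    have hminn' : min (3 * (k + 1) + 1) n = n := by omega
    rw [hminn, hminn']
    refine List.map_congr_left (fun j hj => ?_)
    have hb := (mem_keyOrder_iff n j hn).mp hj
    simp only [Function.comp, beq_iff_eq]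
    by_cases hjk : j = k + 1
    · subst hjk
      rw [if_pos rfl, if_pos le_rfl, chL_empty n (k + 1) (by omega)]
      rfl
    · rw [if_neg (toStr_ne j (k + 1) (by omega) (by omega) hjk)]
      have : (j ≤ k) = (j ≤ k + 1) := by
        by_cases hle : j ≤ k
        · simp [hle]; omega
        · simp [hle]; omega
      simp only [this]

theorem bFold (n : Int) (hn : 2 ≤ n) : ∀ (M : Nat) (k : Int), (n - k).toNat ≤ M → 1 ≤ k → k ≤ n →
    (PySem.List.pyRange (k + 1) (n + 1)).foldl (btAssign n) (treeK n k) = treeK n n := by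
  intro M
  induction M with
  | zero =>
    intro k hMk hk hkn
    have : k = n := by omega
    subst this
    rw [PySem.List.pyRange_one_eq_nil (by omega)]
    rfl
  | succ M ih =>
    intro k hMk hk hkn
    by_cases hcase : k < n
    · rw [PySem.List.pyRange_one_cons (by omega), List.foldl_cons, bAssign_succ n k hk hcase]
      exact ih (k + 1) (by omega) (by omega) (by omega)
    · have : k = n := by omega
      subst this
      rw [PySem.List.pyRange_one_eq_nil (by omega)]
      rfl

theorem treeK_final (n : Int) (hn : 2 ≤ n) : treeK n n = PySem.Dict.mk (finalItems n) := by
  unfold treeK finalItems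
  rw [min_eq_right (by omega)]
  congr 1
  refine List.map_congr_left (fun j hj => ?_)
  have hb := (mem_keyOrder_iff n j hn).mp hj
  rw [if_pos hb.2]

theorem alt_eq_final (n : Int) (hn : 2 ≤ n) : balanced_tree_alt n = finalItems n := by
  unfold balanced_tree_alt
  rw [if_neg (by omega), PySem.List.pyRange_one_cons (by omega), List.foldl_cons,
    bAssign_one n hn, show (1 : Int) + 1 = 1 + 1 from rfl,
    bFold n hn (n - 1).toNat 1 (by omega) le_rfl (by omega), treeK_final n hn]

-- ===== VERDICT (by name: the statement is the Claim_ definition above) =====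
theorem balanced_tree_spec : Claim_equal_balanced_tree := by
  intro n _
  unfold Spec_balanced_tree balanced_tree
  by_cases hn : n < 2
  · have : btLoop n PySem.Dict.empty ["1"] 1 = PySem.Dict.empty := by
      rw [btLoop, dif_neg (by omega)]
    rw [this, balanced_tree_alt, if_pos hn]
    rfl
  · have hn2 : (2 : Int) ≤ n := by omega
    rw [entry n hn2, loop_inv n hn2 (n - 3).toNat 1 (by omega) (by omega), alt_eq_final n hn2]
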